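-- pv_equiv track=rewrite | github.com/ridgelab/ExtRamp-2.0-Benchmarking | scripts/10_plot_vulnerable_sequence_scores_mammalia.py | get_all_changed_header_scores
-- ===== SOURCE A (Python) =====
-- def get_all_changed_header_scores(v1_lengths, v2_lengths, header_to_scores):
--     all_changed_headers = set(v1_lengths.keys()).symmetric_difference(set(v2_lengths.keys()))
--     for header, v2_length in v2_lengths.items():
--         if header in v1_lengths:
--             v1_length = v1_lengths[header]
--             if v2_length != v1_length:
--                 all_changed_headers.add(header)
--     all_changed_headers_to_scores = {header: header_to_scores[header] for header in all_changed_headers}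
--     # remove last window changed headers from the main header_to_scores dictionary
--     for header in all_changed_headers_to_scores:
--         if header in header_to_scores:
--             del header_to_scores[header]
--     return all_changed_headers_to_scores, header_to_scores
-- ===== SOURCE B (Python) =====
-- def get_all_changed_header_scores(v1_lengths, v2_lengths, header_to_scores):
--     _S = object()  # fresh sentinel: equal to no real length
--     # surviving scores: headers whose length is the same in both versions
--     # (headers in neither version compare S == S and survive, as in A)
--     remaining = {h: s for h, s in header_to_scores.items()
--                  if v1_lengths.get(h, _S) == v2_lengths.get(h, _S)}
--     # changed headers, grouped: dropped from v1, then new in v2, then resized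
--     dropped = [h for h in v1_lengths if h not in v2_lengths]
--     new, resized = [], []
--     for h, l2 in v2_lengths.items():
--         if h not in v1_lengths:
--             new.append(h)
--         elif v1_lengths[h] != l2:
--             resized.append(h)
--     result = {h: header_to_scores[h] for h in dropped + new + resized}
--     return result, remaining
-- ===== Notes on version B (the rewrite author's own statement) =====
-- stated objective: alternative
-- what changed: Inverts A's remove-the-changed logic: instead of set symmetric_difference plus an add-loop and then a build-result-then-delete mutation of header_to_scores, B splits header_to_scores purely by a per-header sentinel comparison v1.get(h,S) == v2.get(h,S) (no changed-set needed for the survivors) and gathers the changed headers in one classification pass per input dict; header_to_scores is not mutated.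
import Mathlib
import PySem

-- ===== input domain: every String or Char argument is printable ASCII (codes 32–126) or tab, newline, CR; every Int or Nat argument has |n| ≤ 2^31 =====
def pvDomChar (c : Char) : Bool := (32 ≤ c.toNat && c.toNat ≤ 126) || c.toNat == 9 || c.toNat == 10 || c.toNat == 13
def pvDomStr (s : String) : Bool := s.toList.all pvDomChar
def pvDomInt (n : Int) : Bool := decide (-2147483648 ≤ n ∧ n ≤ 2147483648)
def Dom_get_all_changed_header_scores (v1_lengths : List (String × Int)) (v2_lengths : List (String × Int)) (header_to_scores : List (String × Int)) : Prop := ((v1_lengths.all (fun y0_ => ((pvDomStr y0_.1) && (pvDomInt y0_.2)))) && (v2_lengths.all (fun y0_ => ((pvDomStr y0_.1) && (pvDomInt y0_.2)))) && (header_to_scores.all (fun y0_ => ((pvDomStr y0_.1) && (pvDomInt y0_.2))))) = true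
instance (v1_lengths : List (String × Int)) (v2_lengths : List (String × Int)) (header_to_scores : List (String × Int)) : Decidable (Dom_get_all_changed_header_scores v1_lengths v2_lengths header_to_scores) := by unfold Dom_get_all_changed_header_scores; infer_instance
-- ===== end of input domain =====

-- B inverts A's remove-the-changed logic: it keeps the surviving scores by a per-header sentinel
-- comparison v1.get(h, S) == v2.get(h, S) over header_to_scores (no changed-set, no mutation), and
-- collects the changed headers in one classification pass per input dict (objective: alternative).
-- SIDE EFFECTS: Python A deletes the changed keys from header_to_scores in place; Python B does not
-- mutate any argument — the equivalence proved here is about the returned pair.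
-- Python iterates A's set 'all_changed_headers' in hash order, which the type convention compares
-- ignoring order; the port keeps PySem.Set insertion order.

-- ===== PORT A =====
def get_all_changed_header_scores (v1_lengths : List (String × Int)) (v2_lengths : List (String × Int)) (header_to_scores : List (String × Int)) : (List (String × Int)) × (List (String × Int)) :=
  let d1 := PySem.Dict.ofList v1_lengths
  let d2 := PySem.Dict.ofList v2_lengths
  let hsd := PySem.Dict.ofList header_to_scores
  -- all_changed_headers = set(v1_lengths.keys()).symmetric_difference(set(v2_lengths.keys()))
  let changed0 : PySem.Set String :=
    PySem.Set.symmDiff (PySem.Set.ofList (PySem.Dict.keys d1)) (PySem.Set.ofList (PySem.Dict.keys d2))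
  -- for header, v2_length in v2_lengths.items(): …
  let changed : PySem.Set String := (PySem.Dict.items d2).foldl (fun s p =>
      match PySem.Dict.get? d1 p.1 with   -- 'if header in v1_lengths: v1_length = v1_lengths[header]'
      | some v1_length => if p.2 != v1_length then PySem.Set.add s p.1 else s
      | none => s) changed0
  -- {header: header_to_scores[header] for header in all_changed_headers};
  -- header_to_scores[header] raises KeyError when absent — excluded by Pre_; getD 0 is junk there
  let res := changed.foldl (fun d h => PySem.Dict.insert d h ((PySem.Dict.get? hsd h).getD 0)) PySem.Dict.empty
  -- for header in all_changed_headers_to_scores: if header in header_to_scores: del header_to_scores[header]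
  let rem := (PySem.Dict.keys res).foldl (fun d h => if PySem.Dict.contains d h then PySem.Dict.erase d h else d) hsd
  (PySem.Dict.items res, PySem.Dict.items rem)

-- ===== PORT B =====
def get_all_changed_header_scores_alt (v1_lengths : List (String × Int)) (v2_lengths : List (String × Int)) (header_to_scores : List (String × Int)) : (List (String × Int)) × (List (String × Int)) :=
  let d1 := PySem.Dict.ofList v1_lengths
  let d2 := PySem.Dict.ofList v2_lengths
  let hsd := PySem.Dict.ofList header_to_scores
  -- remaining = {h: s for h, s in header_to_scores.items() if v1.get(h, S) == v2.get(h, S)};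
  -- with a fresh sentinel S, 'v1.get(h, S) == v2.get(h, S)' is equality of the Option-valued lookups
  let remaining := (PySem.Dict.items hsd).filter (fun p =>
      PySem.Dict.get? d1 p.1 == PySem.Dict.get? d2 p.1)
  -- dropped = [h for h in v1_lengths if h not in v2_lengths]
  let dropped := (PySem.Dict.keys d1).filter (fun h => !PySem.Dict.contains d2 h)
  -- for h, l2 in v2_lengths.items(): if h not in v1_lengths: new.append(h) elif v1_lengths[h] != l2: resized.append(h)
  let nr := (PySem.Dict.items d2).foldl (fun (acc : List String × List String) p =>
      match PySem.Dict.get? d1 p.1 with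
      | none => (acc.1 ++ [p.1], acc.2)
      | some l1 => if p.2 != l1 then (acc.1, acc.2 ++ [p.1]) else acc) ([], [])
  -- result = {h: header_to_scores[h] for h in dropped + new + resized};
  -- header_to_scores[h] raises KeyError when absent — excluded by Pre_; getD 0 is junk there
  let result := (dropped ++ nr.1 ++ nr.2).foldl
      (fun d h => PySem.Dict.insert d h ((PySem.Dict.get? hsd h).getD 0)) PySem.Dict.empty
  (PySem.Dict.items result, remaining)

-- ===== PRECONDITION & SPEC =====
-- Both Pythons raise KeyError when some header whose length changed between v1 and v2 is missing
-- from header_to_scores; Pre_ excludes exactly those inputs.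
def Pre_get_all_changed_header_scores (v1_lengths : List (String × Int)) (v2_lengths : List (String × Int)) (header_to_scores : List (String × Int)) : Prop :=
  ∀ h ∈ v1_lengths.map Prod.fst ++ v2_lengths.map Prod.fst,
    PySem.Dict.get? (PySem.Dict.ofList v1_lengths) h ≠ PySem.Dict.get? (PySem.Dict.ofList v2_lengths) h →
    PySem.Dict.contains (PySem.Dict.ofList header_to_scores) h = true
instance (v1_lengths : List (String × Int)) (v2_lengths : List (String × Int)) (header_to_scores : List (String × Int)) : Decidable (Pre_get_all_changed_header_scores v1_lengths v2_lengths header_to_scores) := by unfold Pre_get_all_changed_header_scores; infer_instance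

def pvWitness_get_all_changed_header_scores : (List (String × Int)) × (List (String × Int)) × (List (String × Int)) :=
  ([("a", 1), ("b", 2)], [("b", 3), ("c", 4)], [("a", 10), ("b", 20), ("c", 30)])

def Spec_get_all_changed_header_scores (v1_lengths : List (String × Int)) (v2_lengths : List (String × Int)) (header_to_scores : List (String × Int)) (out : (List (String × Int)) × (List (String × Int))) : Prop := out = get_all_changed_header_scores_alt v1_lengths v2_lengths header_to_scores
instance (v1_lengths : List (String × Int)) (v2_lengths : List (String × Int)) (header_to_scores : List (String × Int)) (out : (List (String × Int)) × (List (String × Int))) : Decidable (Spec_get_all_changed_header_scores v1_lengths v2_lengths header_to_scores out) := by unfold Spec_get_all_changed_header_scores; infer_instance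

-- ===== CLAIM (what is proved, stated in full; the proofs are below) =====
def Claim_equal_get_all_changed_header_scores : Prop := ∀ (v1_lengths : List (String × Int)) (v2_lengths : List (String × Int)) (header_to_scores : List (String × Int)), Dom_get_all_changed_header_scores v1_lengths v2_lengths header_to_scores → Pre_get_all_changed_header_scores v1_lengths v2_lengths header_to_scores → Spec_get_all_changed_header_scores v1_lengths v2_lengths header_to_scores (get_all_changed_header_scores v1_lengths v2_lengths header_to_scores)

-- ===== LEMMAS AND PROOFS =====

-- the Bool condition of A's for-loop / B's 'resized' branch ('in v1 and lengths differ')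
def pvCondA (d1 : PySem.Dict String Int) (p : String × Int) : Bool :=
  match PySem.Dict.get? d1 p.1 with
  | some v1_length => p.2 != v1_length
  | none => false

lemma pv_bodyA (d1 : PySem.Dict String Int) :
    (fun (s : PySem.Set String) (p : String × Int) =>
      match PySem.Dict.get? d1 p.1 with
      | some v1_length => if p.2 != v1_length then PySem.Set.add s p.1 else s
      | none => s)
    = fun s p => if pvCondA d1 p then PySem.Set.add s p.1 else s := by
  funext s p
  unfold pvCondA
  cases PySem.Dict.get? d1 p.1 with
  | none => simp
  | some w => by_cases h : p.2 != w <;> simp [h]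

-- A's conditional-add loop over fresh distinct keys appends the cond-filtered keys to the set.
lemma pv_foldl_set_add (cond : String × Int → Bool) :
    ∀ (L : List (String × Int)) (s0 : PySem.Set String),
      (L.map (fun p => p.1)).Nodup → (∀ p ∈ L, cond p → p.1 ∉ s0) →
      L.foldl (fun s p => if cond p then PySem.Set.add s p.1 else s) s0
        = s0 ++ (L.filter cond).map (fun p => p.1) := by
  intro L
  induction L with
  | nil => intro s0 _ _; simp
  | cons p L ih =>
    intro s0 hnd hs
    simp only [List.map_cons, List.nodup_cons] at hnd
    rw [List.foldl_cons, List.filter_cons]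
    by_cases hc : cond p = true
    · have hnotin : p.1 ∉ s0 := hs p (by simp) hc
      have hadd : PySem.Set.add s0 p.1 = s0 ++ [p.1] := by
        simp only [PySem.Set.add, PySem.Set.contains]
        rw [if_neg (by simpa using hnotin)]
      have hrec := ih (s0 ++ [p.1]) hnd.2 (by
        intro q hq hcq
        simp only [List.mem_append, List.mem_singleton]
        rintro (h1 | h2)
        · exact hs q (by simp [hq]) hcq h1
        · exact hnd.1 (h2 ▸ List.mem_map_of_mem hq))
      show L.foldl _ (if cond p = true then PySem.Set.add s0 p.1 else s0) = _
      rw [if_pos hc, if_pos hc, hadd, hrec]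
      simp
    · show L.foldl _ (if cond p = true then PySem.Set.add s0 p.1 else s0) = _
      rw [if_neg hc, if_neg hc]
      exact ih s0 hnd.2 (fun q hq hcq => hs q (by simp [hq]) hcq)

-- B's classification loop body, as two Bool conditions in sequence
lemma pv_bodyB (d1 : PySem.Dict String Int) :
    (fun (acc : List String × List String) (p : String × Int) =>
      match PySem.Dict.get? d1 p.1 with
      | none => (acc.1 ++ [p.1], acc.2)
      | some l1 => if p.2 != l1 then (acc.1, acc.2 ++ [p.1]) else acc)
    = fun acc p => if !PySem.Dict.contains d1 p.1 then (acc.1 ++ [p.1], acc.2)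
        else if pvCondA d1 p then (acc.1, acc.2 ++ [p.1]) else acc := by
  funext acc p
  have hcont : PySem.Dict.contains d1 p.1 = (PySem.Dict.get? d1 p.1).isSome :=
    PySem.Dict.contains_eq_isSome_get? d1 p.1
  unfold pvCondA
  cases hg : PySem.Dict.get? d1 p.1 with
  | none => rw [hcont, hg]; rfl
  | some l1 => rw [hcont, hg]; rfl

-- a two-bucket classification fold over a list = the two filters (conditions mutually exclusive)
lemma pv_pair_fold (c1 c2 : String × Int → Bool)
    (hexcl : ∀ p, c1 p = true → c2 p = false) :
    ∀ (L : List (String × Int)) (a b : List String),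
      L.foldl (fun (acc : List String × List String) p =>
          if c1 p then (acc.1 ++ [p.1], acc.2)
          else if c2 p then (acc.1, acc.2 ++ [p.1]) else acc) (a, b)
        = (a ++ (L.filter c1).map (fun p => p.1), b ++ (L.filter c2).map (fun p => p.1)) := by
  intro L
  induction L with
  | nil => intro a b; simp
  | cons p L ih =>
    intro a b
    rw [List.foldl_cons, List.filter_cons, List.filter_cons]
    by_cases h1 : c1 p = true
    · have h2 : c2 p = false := hexcl p h1
      rw [if_pos h1, if_pos h1, h2, ih]
      simp
    · rw [if_neg h1, if_neg h1]
      by_cases h2 : c2 p = true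
      · rw [if_pos h2, if_pos h2, ih]
        simp
      · rw [if_neg h2, if_neg h2, ih]

-- map-fst commutes with a key-only filter
lemma pv_filter_map (l : List (String × Int)) (c : String → Bool) :
    (l.filter (fun p => c p.1)).map (fun p => p.1) = (l.map (fun p => p.1)).filter c := by
  induction l with
  | nil => rfl
  | cons p l ih => by_cases h : c p.1 <;> simp [h, ih]

lemma pv_erase_of_not_contains (d : PySem.Dict String Int) (k : String)
    (h : PySem.Dict.contains d k = false) : PySem.Dict.erase d k = d := by
  obtain ⟨items⟩ := d
  simp only [PySem.Dict.erase, PySem.Dict.contains, List.any_eq_false] at *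
  congr 1
  exact List.filter_eq_self.mpr (fun p hp => by simpa using h p hp)

-- items of an erase loop: one filter over the original items.
lemma pv_items_foldl_erase :
    ∀ (L : List String) (d : PySem.Dict String Int),
      PySem.Dict.items (L.foldl (fun d h => PySem.Dict.erase d h) d)
        = (PySem.Dict.items d).filter (fun p => !L.contains p.1) := by
  intro L
  induction L with
  | nil =>
    intro d
    simp
  | cons k L ih =>
    intro d
    rw [List.foldl_cons, ih]
    obtain ⟨items⟩ := d
    show (List.filter _ (PySem.Dict.items (PySem.Dict.erase ⟨items⟩ k))) = _
    simp only [PySem.Dict.erase, List.filter_filter]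
    apply List.filter_congr
    intro p _
    by_cases hpk : p.1 = k
    · simp [hpk]
    · simp [hpk]

lemma pv_contains_keys (d : PySem.Dict String Int) (h : String) :
    List.contains (PySem.Dict.keys d) h = PySem.Dict.contains d h := by
  rw [PySem.Dict.contains_eq_decide_mem_keys, List.contains_eq_mem]

theorem pv_main (v1_lengths v2_lengths header_to_scores : List (String × Int)) :
    get_all_changed_header_scores v1_lengths v2_lengths header_to_scores
      = get_all_changed_header_scores_alt v1_lengths v2_lengths header_to_scores := by
  simp only [get_all_changed_header_scores, get_all_changed_header_scores_alt]
  set d1 := PySem.Dict.ofList v1_lengths with hd1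
  set d2 := PySem.Dict.ofList v2_lengths with hd2
  set hsd := PySem.Dict.ofList header_to_scores with hhsd
  have hK1 : (PySem.Dict.keys d1).Nodup := PySem.Dict.nodup_keys_ofList v1_lengths
  have hK2 : (PySem.Dict.keys d2).Nodup := PySem.Dict.nodup_keys_ofList v2_lengths
  -- the symmetric difference, written with plain membership filters
  have hchanged0 : PySem.Set.symmDiff (PySem.Set.ofList (PySem.Dict.keys d1)) (PySem.Set.ofList (PySem.Dict.keys d2))
      = (PySem.Dict.keys d1).filter (fun h => !PySem.Dict.contains d2 h)
        ++ (PySem.Dict.keys d2).filter (fun h => !PySem.Dict.contains d1 h) := by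
    rw [PySem.Set.ofList_eq_self_of_nodup _ hK1, PySem.Set.ofList_eq_self_of_nodup _ hK2]
    unfold PySem.Set.symmDiff PySem.Set.diff
    congr 1
    · exact List.filter_congr (fun h _ => by
        simp only [PySem.Set.contains, pv_contains_keys])
    · exact List.filter_congr (fun h _ => by
        simp only [PySem.Set.contains, pv_contains_keys])
  set f1 := (PySem.Dict.keys d1).filter (fun h => !PySem.Dict.contains d2 h) with hf1
  set f2 := (PySem.Dict.keys d2).filter (fun h => !PySem.Dict.contains d1 h) with hf2
  set f3 := ((PySem.Dict.items d2).filter (pvCondA d1)).map (fun p => p.1) with hf3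
  -- A's for-loop appends exactly the resized headers to the symmetric difference
  have hfold : (PySem.Dict.items d2).foldl
        (fun s p => if pvCondA d1 p then PySem.Set.add s p.1 else s) (f1 ++ f2)
      = f1 ++ f2 ++ f3 := by
    apply pv_foldl_set_add
    · exact hK2
    · intro p hp hcp
      have hp2 : p.1 ∈ PySem.Dict.keys d2 := List.mem_map_of_mem hp
      have hp1 : p.1 ∈ PySem.Dict.keys d1 := by
        unfold pvCondA at hcp
        cases hg : PySem.Dict.get? d1 p.1 with
        | none => rw [hg] at hcp; simp at hcp
        | some w =>
          exact (PySem.Dict.contains_iff_mem_keys d1 p.1).mp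
            (by rw [PySem.Dict.contains_eq_isSome_get?, hg]; rfl)
      simp only [hf1, hf2, List.mem_append, List.mem_filter, Bool.not_eq_eq_eq_not,
        Bool.not_true] at *
      rintro (⟨_, hno2⟩ | ⟨_, hno1⟩)
      · exact absurd ((PySem.Dict.contains_iff_mem_keys d2 p.1).mpr hp2) (by simp [hno2])
      · exact absurd ((PySem.Dict.contains_iff_mem_keys d1 p.1).mpr hp1) (by simp [hno1])
  -- the changed list is duplicate-free
  have hsub3 : ∀ h ∈ f3, h ∈ PySem.Dict.keys d2 := by
    intro h hh
    rcases List.mem_map.mp hh with ⟨p, hp, rfl⟩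
    exact List.mem_map_of_mem (List.mem_of_mem_filter hp)
  have hin1 : ∀ h ∈ f3, h ∈ PySem.Dict.keys d1 := by
    intro h hh
    rcases List.mem_map.mp hh with ⟨p, hp, rfl⟩
    have hcp := List.of_mem_filter hp
    unfold pvCondA at hcp
    cases hg : PySem.Dict.get? d1 p.1 with
    | none => rw [hg] at hcp; simp at hcp
    | some w =>
      exact (PySem.Dict.contains_iff_mem_keys d1 p.1).mp
        (by rw [PySem.Dict.contains_eq_isSome_get?, hg]; rfl)
  have hnC : (f1 ++ f2 ++ f3).Nodup := by
    rw [List.append_assoc]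
    have hn1 : f1.Nodup := hK1.filter _
    have hn2 : f2.Nodup := hK2.filter _
    have hsl : (List.filter (pvCondA d1) (PySem.Dict.items d2)).Sublist (PySem.Dict.items d2) :=
      List.filter_sublist
    have hn3 : f3.Nodup := (hsl.map (fun p => p.1)).nodup
      (show (List.map (fun (p : String × Int) => p.1) (PySem.Dict.items d2)).Nodup from hK2)
    refine hn1.append (hn2.append hn3 ?_) ?_
    · -- f2 (not in d1) vs f3 (in d1)
      intro a ha hb
      have := List.mem_filter.mp ha
      exact absurd ((PySem.Dict.contains_iff_mem_keys d1 a).mpr (hin1 a hb)) (by simpa using this.2)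
    · -- f1 (not in d2) vs f2 ++ f3 (in d2)
      intro a ha hb
      have h1 := List.mem_filter.mp ha
      have h2 : a ∈ PySem.Dict.keys d2 := by
        rcases List.mem_append.mp hb with hb2 | hb3
        · exact List.mem_of_mem_filter hb2
        · exact hsub3 a hb3
      exact absurd ((PySem.Dict.contains_iff_mem_keys d2 a).mpr h2) (by simpa using h1.2)
  -- membership in the changed list = the two Option-valued lookups disagree
  have hmemC : ∀ h : String, (h ∈ f1 ++ f2 ++ f3) ↔ PySem.Dict.get? d1 h ≠ PySem.Dict.get? d2 h := by
    intro h
    rw [List.append_assoc]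
    constructor
    · intro hm
      rcases List.mem_append.mp hm with h1 | h23
      · have := List.mem_filter.mp h1
        have hg1 : (PySem.Dict.get? d1 h).isSome := by
          rw [← PySem.Dict.contains_eq_isSome_get?]
          exact (PySem.Dict.contains_iff_mem_keys d1 h).mpr this.1
        have hg2 : PySem.Dict.get? d2 h = none := by
          rw [PySem.Dict.get?_eq_none_iff_contains]
          simpa using this.2
        intro he; rw [he, hg2] at hg1; simp at hg1
      · rcases List.mem_append.mp h23 with h2 | h3
        · have := List.mem_filter.mp h2
          have hg2 : (PySem.Dict.get? d2 h).isSome := by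
            rw [← PySem.Dict.contains_eq_isSome_get?]
            exact (PySem.Dict.contains_iff_mem_keys d2 h).mpr this.1
          have hg1 : PySem.Dict.get? d1 h = none := by
            rw [PySem.Dict.get?_eq_none_iff_contains]
            simpa using this.2
          intro he; rw [← he, hg1] at hg2; simp at hg2
        · rcases List.mem_map.mp h3 with ⟨p, hp, rfl⟩
          have hpf := List.of_mem_filter hp
          have hpm := List.mem_of_mem_filter hp
          have hg2 : PySem.Dict.get? d2 p.1 = some p.2 :=
            PySem.Dict.get?_of_mem_items d2 (by simpa using hpm) hK2
          intro he
          rw [hg2] at he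
          unfold pvCondA at hpf
          rw [he] at hpf
          simp at hpf
    · intro hne
      cases hg1 : PySem.Dict.get? d1 h with
      | none =>
        cases hg2 : PySem.Dict.get? d2 h with
        | none => exact absurd (hg1.trans hg2.symm) hne
        | some b =>
          apply List.mem_append.mpr; right; apply List.mem_append.mpr; left
          apply List.mem_filter.mpr
          refine ⟨(PySem.Dict.contains_iff_mem_keys d2 h).mp ?_, ?_⟩
          · rw [PySem.Dict.contains_eq_isSome_get?, hg2]; rfl
          · simp only [Bool.not_eq_eq_eq_not, Bool.not_true]
            rw [← Bool.not_eq_true, PySem.Dict.contains_eq_isSome_get?, hg1]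
            simp
      | some a =>
        cases hg2 : PySem.Dict.get? d2 h with
        | none =>
          apply List.mem_append.mpr; left
          apply List.mem_filter.mpr
          refine ⟨(PySem.Dict.contains_iff_mem_keys d1 h).mp ?_, ?_⟩
          · rw [PySem.Dict.contains_eq_isSome_get?, hg1]; rfl
          · simp only [Bool.not_eq_eq_eq_not, Bool.not_true]
            rw [← Bool.not_eq_true, PySem.Dict.contains_eq_isSome_get?, hg2]
            simp
        | some b =>
          have hab : a ≠ b := by
            intro he; rw [he] at hg1; exact hne (hg1.trans hg2.symm)
          apply List.mem_append.mpr; right; apply List.mem_append.mpr; right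
          rw [hf3]
          have hmem2 : (h, b) ∈ PySem.Dict.items d2 :=
            PySem.Dict.mem_items_of_get?_eq_some d2 hg2
          refine List.mem_map.mpr ⟨(h, b), List.mem_filter.mpr ⟨hmem2, ?_⟩, rfl⟩
          unfold pvCondA
          simp only [hg1]
          simpa using (Ne.symm hab)
  -- A: rewrite the loop body to its Bool condition, fold the set loop
  rw [pv_bodyA d1, hchanged0, hfold]
  -- B: rewrite the classification loop to the two filters
  have hexcl : ∀ p : String × Int, (!PySem.Dict.contains d1 p.1) = true → pvCondA d1 p = false := by
    intro p hc
    unfold pvCondA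
    have : PySem.Dict.get? d1 p.1 = none := by
      rw [PySem.Dict.get?_eq_none_iff_contains]
      simpa using hc
    rw [this]
  rw [pv_bodyB d1, pv_pair_fold (fun p => !PySem.Dict.contains d1 p.1) (pvCondA d1) hexcl
        (PySem.Dict.items d2) [] []]
  have hmap1 : ((PySem.Dict.items d2).filter (fun p => !PySem.Dict.contains d1 p.1)).map
      (fun p => p.1) = f2 := by
    rw [pv_filter_map (PySem.Dict.items d2) (fun h => !PySem.Dict.contains d1 h), hf2]
    rfl
  simp only [List.nil_append, hmap1, ← hf3]
  -- the two result folds are now over the same changed list; compare the remainders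
  rw [Prod.mk.injEq]
  refine ⟨rfl, ?_⟩
  -- A's result keys are exactly the changed list
  have hkeys : ((f1 ++ f2 ++ f3).foldl (fun d h => PySem.Dict.insert d h ((PySem.Dict.get? hsd h).getD 0)) PySem.Dict.empty).keys = f1 ++ f2 ++ f3 := by
    rw [PySem.Dict.keys_foldl_insert (f1 ++ f2 ++ f3) (fun _ h => ((PySem.Dict.get? hsd h).getD 0)) PySem.Dict.empty,
      PySem.Dict.keys_empty]
    show PySem.Set.ofList (f1 ++ f2 ++ f3) = f1 ++ f2 ++ f3
    exact PySem.Set.ofList_eq_self_of_nodup _ hnC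
  rw [hkeys]
  -- A's guarded delete loop is the plain erase loop
  have herase : (fun (d : PySem.Dict String Int) h => if PySem.Dict.contains d h then PySem.Dict.erase d h else d)
      = fun d h => PySem.Dict.erase d h := by
    funext d h
    by_cases hc : PySem.Dict.contains d h = true
    · rw [if_pos hc]
    · rw [if_neg (by simpa using hc), pv_erase_of_not_contains d h (by simpa using hc)]
  rw [herase, pv_items_foldl_erase]
  -- filtering out the changed keys = keeping the keys whose lookups agree
  apply List.filter_congr
  intro p _
  by_cases hm : p.1 ∈ f1 ++ f2 ++ f3
  · have hne := (hmemC p.1).mp hm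
    rw [(by simpa using hm : List.contains (f1 ++ f2 ++ f3) p.1 = true)]
    simpa using hne
  · rw [(by simpa using hm : List.contains (f1 ++ f2 ++ f3) p.1 = false)]
    have he : PySem.Dict.get? d1 p.1 = PySem.Dict.get? d2 p.1 := by
      by_contra hne
      exact hm ((hmemC p.1).mpr hne)
    simpa using he

-- ===== VERDICT (by name: the statement is the Claim_ definition above) =====
theorem get_all_changed_header_scores_spec : Claim_equal_get_all_changed_header_scores := by
  intro v1 v2 hs _ _
  exact pv_main v1 v2 hs
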